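-- pv_equiv track=rewrite | github.com/hanhanwu/Hanhan_NLP | purpose_extraction_sandbox.py | extract_simple_sequences
-- ===== SOURCE A (Python) =====
-- def get_pos_index(general_pos, pos_lst, pre_idx, post_idx, specified_position=0):
--   all_idx = [i for i,x in enumerate(pos_lst) if x.startswith(general_pos) and i > pre_idx and i < post_idx]
--   if len(all_idx) != 0 and len(all_idx) > specified_position: return all_idx[specified_position]
--   return -1
--
-- def extract_simple_sequences(s, target_pos_lst):
--   token_lst = [tp[0] for tp in s]
--   pos_lst = [tp[1] for tp in s]
--   target_pos_lst_len = len(target_pos_lst)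
--   i = 0
--   pre_idx = -1
--   idx_lst = []
--   post_idx = len(pos_lst)
--   while i < target_pos_lst_len:
--     idx = get_pos_index(target_pos_lst[i], pos_lst, pre_idx, post_idx)
--     if idx == -1: return []
--     idx_lst.append(idx)
--     pre_idx = idx
--     i += 1
--   return [token_lst[idx] for idx in idx_lst]
-- ===== SOURCE B (Python) =====
-- def extract_simple_sequences(s, target_pos_lst):
--   out = []
--   j = 0
--   m = len(target_pos_lst)
--   for tok, pos in s:
--     if j == m:
--       break
--     if pos.startswith(target_pos_lst[j]):
--       out.append(tok)
--       j += 1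
--   return out if j == m else []
-- ===== Notes on version B (the rewrite author's own statement) =====
-- stated objective: faster
-- what changed: Replaced the per-target full scan of the POS list (get_pos_index enumerates and filters the whole list for each target) with a single linear pass over s that advances one pointer through target_pos_lst greedily.
import Mathlib
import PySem

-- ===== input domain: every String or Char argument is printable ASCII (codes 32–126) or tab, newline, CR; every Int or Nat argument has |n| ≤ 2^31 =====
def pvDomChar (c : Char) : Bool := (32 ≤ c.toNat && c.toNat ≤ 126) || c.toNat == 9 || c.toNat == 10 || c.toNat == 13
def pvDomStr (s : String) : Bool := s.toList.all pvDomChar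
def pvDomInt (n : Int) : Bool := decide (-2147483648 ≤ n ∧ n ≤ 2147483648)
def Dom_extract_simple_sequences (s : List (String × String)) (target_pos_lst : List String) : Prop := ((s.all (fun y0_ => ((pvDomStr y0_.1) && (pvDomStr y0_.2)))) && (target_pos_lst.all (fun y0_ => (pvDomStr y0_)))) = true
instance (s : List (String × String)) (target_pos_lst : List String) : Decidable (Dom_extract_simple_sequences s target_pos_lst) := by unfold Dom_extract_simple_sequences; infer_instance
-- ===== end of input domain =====

-- B replaces A's per-target rescans of the whole POS list with one linear pass and an
-- advancing pointer over the targets (objective: faster, asymptotic O(m*n) → O(n+m)).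

-- ===== PORT A =====
-- get_pos_index: list comprehension over enumerate, then all_idx[specified_position].
-- (Under the guard the index is in range, so pyGetD with a dummy default is exact.)
def get_pos_index (general_pos : String) (pos_lst : List String)
    (pre_idx post_idx : Int) (specified_position : Int) : Int :=
  let all_idx : List Int :=
    ((PySem.List.enumerate pos_lst 0).filter
      (fun ix => PySem.Str.startswith ix.2 general_pos
        && decide (pre_idx < ix.1) && decide (ix.1 < post_idx))).map (·.1)
  if (all_idx.length ≠ 0 ∧ (all_idx.length : Int) > specified_position) then
    PySem.List.pyGetD all_idx specified_position (-1)
  else -1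

-- A's while loop over i = 0 .. len(target_pos_lst)-1, carrying pre_idx and idx_lst.
def aLoop (pos_lst : List String) (post_idx : Int) :
    List String → Int → List Int → Option (List Int)
  | [], _, idx_lst => some idx_lst
  | t :: ts, pre_idx, idx_lst =>
    let idx := get_pos_index t pos_lst pre_idx post_idx 0
    if idx = -1 then none
    else aLoop pos_lst post_idx ts idx (idx_lst ++ [idx])

def extract_simple_sequences (s : List (String × String)) (target_pos_lst : List String) : List String :=
  let token_lst := s.map (·.1)
  let pos_lst := s.map (·.2)
  match aLoop pos_lst (pos_lst.length : Int) target_pos_lst (-1) [] with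
  | none => []
  | some idx_lst => idx_lst.map (fun idx => PySem.List.pyGetD token_lst idx "")

-- ===== PORT B =====
-- One pass over s; the remaining-targets list is B's pointer j (j = m - remaining.length).
def altLoop : List (String × String) → List String → List String → List String × List String
  | [], ts, out => (out, ts)
  | _ :: _, [], out => (out, [])
  | (tok, pos) :: rest, t :: ts, out =>
    if PySem.Str.startswith pos t then altLoop rest ts (out ++ [tok])
    else altLoop rest (t :: ts) out

def extract_simple_sequences_alt (s : List (String × String)) (target_pos_lst : List String) : List String :=
  let r := altLoop s target_pos_lst []
  if r.2.isEmpty then r.1 else []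

-- ===== PRECONDITION & SPEC =====
def Spec_extract_simple_sequences (s : List (String × String)) (target_pos_lst : List String) (out : List String) : Prop := out = extract_simple_sequences_alt s target_pos_lst
instance (s : List (String × String)) (target_pos_lst : List String) (out : List String) : Decidable (Spec_extract_simple_sequences s target_pos_lst out) := by unfold Spec_extract_simple_sequences; infer_instance

-- ===== CLAIM (what is proved, stated in full; the proofs are below) =====
def Claim_equal_extract_simple_sequences : Prop := ∀ (s : List (String × String)) (target_pos_lst : List String), Dom_extract_simple_sequences s target_pos_lst → Spec_extract_simple_sequences s target_pos_lst (extract_simple_sequences s target_pos_lst)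

-- ===== LEMMAS AND PROOFS =====

-- Common reference point: greedy subsequence match returning the matched tokens.
def greedy : List (String × String) → List String → Option (List String)
  | _, [] => some []
  | [], _ :: _ => none
  | (tok, pos) :: rest, t :: ts =>
    if PySem.Str.startswith pos t then (greedy rest ts).map (tok :: ·)
    else greedy rest (t :: ts)

-- Same thing, collecting absolute indices (k = index of the list head in the full s).
def greedyIdx : List (String × String) → List String → Nat → Option (List Int)
  | _, [], _ => some []
  | [], _ :: _, _ => none
  | (_, pos) :: rest, t :: ts, k =>
    if PySem.Str.startswith pos t then (greedyIdx rest ts (k + 1)).map ((k : Int) :: ·)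
    else greedyIdx rest (t :: ts) (k + 1)

-- ---- B side ----

theorem altLoop_some (s : List (String × String)) : ∀ (ts out r : List String),
    greedy s ts = some r → altLoop s ts out = (out ++ r, []) := by
  induction s with
  | nil =>
    intro ts out r h
    cases ts with
    | nil => simp [greedy] at h; simp [altLoop, ← h]
    | cons t ts => simp [greedy] at h
  | cons x rest ih =>
    intro ts out r h
    obtain ⟨tok, pos⟩ := x
    cases ts with
    | nil => simp [greedy] at h; simp [altLoop, ← h]
    | cons t ts =>
      simp only [greedy] at h
      simp only [altLoop]
      by_cases hs : PySem.Str.startswith pos t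
      · simp only [hs, if_true] at h ⊢
        cases hg : greedy rest ts with
        | none => rw [hg] at h; simp at h
        | some r' =>
          rw [hg] at h
          simp only [Option.map_some, Option.some.injEq] at h
          rw [ih ts (out ++ [tok]) r' hg, ← h]
          simp
      · simp only [hs] at h ⊢
        exact ih (t :: ts) out r h

theorem altLoop_none (s : List (String × String)) : ∀ (ts out : List String),
    greedy s ts = none → (altLoop s ts out).2 ≠ [] := by
  induction s with
  | nil =>
    intro ts out h
    cases ts with
    | nil => simp [greedy] at h
    | cons t ts => simp [altLoop]
  | cons x rest ih =>
    intro ts out h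
    obtain ⟨tok, pos⟩ := x
    cases ts with
    | nil => simp [greedy] at h
    | cons t ts =>
      simp only [greedy] at h
      simp only [altLoop]
      by_cases hs : PySem.Str.startswith pos t
      · simp only [hs, if_true] at h ⊢
        cases hg : greedy rest ts with
        | none => exact ih ts (out ++ [tok]) hg
        | some r' => rw [hg] at h; simp at h
      · simp only [hs] at h ⊢
        exact ih (t :: ts) out h

theorem alt_eq_greedy (s : List (String × String)) (ts : List String) :
    extract_simple_sequences_alt s ts = (greedy s ts).getD [] := by
  simp only [extract_simple_sequences_alt]
  cases hg : greedy s ts with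
  | none =>
    have := altLoop_none s ts [] hg
    simp only [List.isEmpty_iff]
    rw [if_neg this]
    rfl
  | some r =>
    rw [altLoop_some s ts [] r hg]
    simp

-- ---- A side ----

theorem mem_enumerate_bounds {α : Type} (l : List α) : ∀ (a : Int) (ix : Int × α),
    ix ∈ PySem.List.enumerate l a → a ≤ ix.1 ∧ ix.1 < a + l.length := by
  induction l with
  | nil => intro a ix h; simp [PySem.List.enumerate_nil] at h
  | cons x xs ih =>
    intro a ix h
    rw [PySem.List.enumerate_cons] at h
    rcases List.mem_cons.mp h with h | h
    · subst h; simp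
    · have := ih (a + 1) ix h
      simp at this ⊢
      omega

theorem enumerate_append {α : Type} (xs ys : List α) : ∀ (a : Int),
    PySem.List.enumerate (xs ++ ys) a
      = PySem.List.enumerate xs a ++ PySem.List.enumerate ys (a + xs.length) := by
  induction xs with
  | nil => intro a; simp [PySem.List.enumerate_nil]
  | cons x xs ih =>
    intro a
    simp only [List.cons_append, PySem.List.enumerate_cons, ih (a + 1), List.length_cons]
    push_cast
    rw [show a + 1 + (xs.length : Int) = a + ((xs.length : Int) + 1) by ring]

theorem head_filter_enum (f : String → Bool) : ∀ (l : List String) (a : Int),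
    ((((PySem.List.enumerate l a).filter (fun ix => f ix.2)).map (·.1))).head?
      = (l.findIdx? f).map (fun j => a + (j : Int)) := by
  intro l
  induction l with
  | nil => intro a; simp [PySem.List.enumerate_nil]
  | cons x xs ih =>
    intro a
    rw [PySem.List.enumerate_cons, List.findIdx?_cons]
    by_cases hf : f x
    · simp [hf]
    · simp only [List.filter_cons, hf, Bool.false_eq_true, if_false]
      rw [ih (a + 1)]
      cases List.findIdx? f xs with
      | none => simp
      | some j =>
        simp only [Option.map_some]
        simp
        ring

-- get_pos_index at the call shape A uses (pre = p-1, post = full length, position 0)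
-- is "first index ≥ p whose POS matches", i.e. findIdx? on the dropped suffix.
theorem gpi_eq (pos : List String) (p : Nat) (hp : p ≤ pos.length) (t : String) :
    get_pos_index t pos ((p : Int) - 1) (pos.length : Int) 0
      = match (pos.drop p).findIdx? (fun x => PySem.Str.startswith x t) with
        | some j => ((p + j : Nat) : Int)
        | none => -1 := by
  simp only [get_pos_index]
  have hlen : (pos.take p).length = p := by simp [hp]
  have key : PySem.List.enumerate pos 0
      = PySem.List.enumerate (pos.take p) 0 ++ PySem.List.enumerate (pos.drop p) (p : Int) := by
    conv_lhs => rw [← List.take_append_drop p pos]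
    rw [enumerate_append]
    congr 2
    rw [hlen]
    ring
  rw [key, List.filter_append]
  have h1 : (PySem.List.enumerate (pos.take p) 0).filter
      (fun ix => PySem.Str.startswith ix.2 t
        && decide (((p:Int) - 1) < ix.1) && decide (ix.1 < (pos.length : Int))) = [] := by
    rw [List.filter_eq_nil_iff]
    intro ix hmem
    have hb := mem_enumerate_bounds _ 0 ix hmem
    rw [hlen] at hb
    simp only [Bool.and_eq_true, decide_eq_true_eq, not_and]
    intro _ hlt
    omega
  have h2 : (PySem.List.enumerate (pos.drop p) (p : Int)).filter
      (fun ix => PySem.Str.startswith ix.2 t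
        && decide (((p:Int) - 1) < ix.1) && decide (ix.1 < (pos.length : Int)))
      = (PySem.List.enumerate (pos.drop p) (p : Int)).filter
          (fun ix => PySem.Str.startswith ix.2 t) := by
    apply List.filter_congr
    intro ix hmem
    have hb := mem_enumerate_bounds _ (p : Int) ix hmem
    have hdl : (pos.drop p).length = pos.length - p := by simp
    rw [hdl] at hb
    have e1 : decide (((p:Int) - 1) < ix.1) = true := by simp; omega
    have e2 : decide (ix.1 < (pos.length : Int)) = true := by simp; omega
    rw [e1, e2]
    simp
  rw [h1, h2, List.nil_append]
  have hhead := head_filter_enum (fun x => PySem.Str.startswith x t) (pos.drop p) (p : Int)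
  cases hfi : (pos.drop p).findIdx? (fun x => PySem.Str.startswith x t) with
  | none =>
    rw [hfi] at hhead
    have hnil : ((PySem.List.enumerate (pos.drop p) (p : Int)).filter
        (fun ix => PySem.Str.startswith ix.2 t)).map (·.1) = [] := by
      rw [← List.head?_eq_none_iff]
      simpa using hhead
    rw [hnil]
    simp
  | some j =>
    rw [hfi] at hhead
    replace hhead : ((((PySem.List.enumerate (pos.drop p) (p : Int)).filter
        (fun ix => PySem.Str.startswith ix.2 t)).map (·.1)).head?) = some ((p : Int) + (j : Int)) := by
      simpa using hhead
    cases hA : ((PySem.List.enumerate (pos.drop p) (p : Int)).filter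
        (fun ix => PySem.Str.startswith ix.2 t)).map (·.1) with
    | nil => rw [hA] at hhead; simp at hhead
    | cons a rest =>
      rw [hA] at hhead
      simp only [List.head?_cons, Option.some.injEq] at hhead
      have hguard : ((a :: rest).length ≠ 0 ∧ ((a :: rest).length : Int) > 0) := by
        constructor <;> simp
      rw [if_pos hguard, PySem.List.pyGetD_zero_cons]
      rw [hhead]
      push_cast
      ring

theorem greedyIdx_none (t : String) (ts : List String) : ∀ (l : List (String × String)) (k : Nat),
    (l.map (·.2)).findIdx? (fun x => PySem.Str.startswith x t) = none →
    greedyIdx l (t :: ts) k = none := by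
  intro l
  induction l with
  | nil => intro k _; rfl
  | cons x rest ih =>
    intro k h
    obtain ⟨tok, pos⟩ := x
    simp only [List.map_cons, List.findIdx?_cons] at h
    by_cases hs : PySem.Str.startswith pos t
    · simp only [hs, if_true] at h
      simp at h
    · simp only [hs, Bool.false_eq_true, if_false] at h
      cases hj : (rest.map (·.2)).findIdx? (fun x => PySem.Str.startswith x t) with
      | some j' => rw [hj] at h; simp at h
      | none =>
        simp only [greedyIdx, hs, Bool.false_eq_true, if_false]
        exact ih (k + 1) hj

theorem greedyIdx_found (t : String) (ts : List String) : ∀ (l : List (String × String)) (j k : Nat),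
    (l.map (·.2)).findIdx? (fun x => PySem.Str.startswith x t) = some j →
    greedyIdx l (t :: ts) k
      = (greedyIdx (l.drop (j + 1)) ts (k + j + 1)).map (fun r => ((k + j : Nat) : Int) :: r) := by
  intro l
  induction l with
  | nil => intro j k h; simp at h
  | cons x rest ih =>
    intro j k h
    obtain ⟨tok, pos⟩ := x
    simp only [List.map_cons, List.findIdx?_cons] at h
    by_cases hs : PySem.Str.startswith pos t
    · simp only [hs, if_true, Option.some.injEq] at h
      subst h
      simp only [greedyIdx, hs, if_true]
      rfl
    · simp only [hs, Bool.false_eq_true, if_false] at h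
      cases hj : (rest.map (·.2)).findIdx? (fun x => PySem.Str.startswith x t) with
      | none => rw [hj] at h; simp at h
      | some j' =>
        rw [hj] at h
        simp only [Option.map_some, Option.some.injEq] at h
        subst h
        simp only [greedyIdx, hs, Bool.false_eq_true, if_false]
        rw [ih j' (k + 1) hj]
        have e1 : k + 1 + j' + 1 = k + (j' + 1) + 1 := by omega
        have e2 : k + 1 + j' = k + (j' + 1) := by omega
        rw [e1, e2]
        rfl

theorem aLoop_eq (s : List (String × String)) : ∀ (ts : List String) (p : Nat) (acc : List Int),
    p ≤ s.length →
    aLoop (s.map (·.2)) ((s.map (·.2)).length : Int) ts ((p : Int) - 1) acc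
      = (greedyIdx (s.drop p) ts p).map (fun r => acc ++ r) := by
  intro ts
  induction ts with
  | nil => intro p acc _; simp [aLoop, greedyIdx]
  | cons t ts ih =>
    intro p acc hp
    simp only [aLoop]
    have hp' : p ≤ (s.map (·.2)).length := by simpa using hp
    have hmd : (s.map (·.2)).drop p = (s.drop p).map (·.2) := by
      rw [List.map_drop]
    cases hfi : ((s.drop p).map (·.2)).findIdx? (fun x => PySem.Str.startswith x t) with
    | none =>
      have hidx : get_pos_index t (s.map (·.2)) ((p : Int) - 1) (((s.map (·.2)).length : Nat) : Int) 0 = -1 := by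
        rw [gpi_eq (s.map (·.2)) p hp' t, hmd, hfi]
      rw [hidx, if_pos rfl]
      rw [greedyIdx_none t ts (s.drop p) p hfi]
      rfl
    | some j =>
      have hidx : get_pos_index t (s.map (·.2)) ((p : Int) - 1) (((s.map (·.2)).length : Nat) : Int) 0
          = ((p + j : Nat) : Int) := by
        rw [gpi_eq (s.map (·.2)) p hp' t, hmd, hfi]
      have hjlt : j < ((s.drop p).map (·.2)).length := by
        have := List.findIdx?_eq_some_iff_findIdx_eq.mp hfi
        omega
      have hjs : p + j + 1 ≤ s.length := by
        simp [List.length_drop] at hjlt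
        omega
      have hne : ((p + j : Nat) : Int) ≠ -1 := by omega
      rw [hidx, if_neg hne]
      have e0 : ((p + j : Nat) : Int) = ((p + j + 1 : Nat) : Int) - 1 := by push_cast; ring
      rw [e0, ih (p + j + 1) (acc ++ [((p + j + 1 : Nat) : Int) - 1]) hjs]
      rw [greedyIdx_found t ts (s.drop p) j p hfi]
      rw [List.drop_drop]
      have e1 : p + (j + 1) = p + j + 1 := by omega
      rw [e1]
      cases greedyIdx (s.drop (p + j + 1)) ts (p + j + 1) with
      | none => rfl
      | some r =>
        simp only [Option.map_some, Option.some.injEq]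
        rw [← e0]
        simp

theorem greedyIdx_tokens (s : List (String × String)) : ∀ (l : List (String × String)) (ts : List String) (k : Nat),
    l = s.drop k →
    (greedyIdx l ts k).map (List.map (fun i => PySem.List.pyGetD (s.map (·.1)) i ""))
      = greedy l ts := by
  intro l
  induction l with
  | nil =>
    intro ts k _
    cases ts with
    | nil => rfl
    | cons t ts => rfl
  | cons x rest ih =>
    intro ts k hdrop
    obtain ⟨tok, pos⟩ := x
    have hrest : rest = s.drop (k + 1) := by
      rw [← List.tail_drop, ← hdrop]
      rfl
    have htok : PySem.List.pyGetD (s.map (·.1)) (k : Int) "" = tok := by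
      rw [PySem.List.pyGetD_natCast]
      have hk : s[k]? = some (tok, pos) := by
        rw [← List.head?_drop, ← hdrop]
        rfl
      have : (s.map (·.1)).getD k "" = ((s.map (·.1))[k]?).getD "" := by
        rw [List.getD_eq_getElem?_getD]
      rw [this, List.getElem?_map, hk]
      rfl
    cases ts with
    | nil => rfl
    | cons t ts =>
      simp only [greedyIdx, greedy]
      by_cases hs : PySem.Str.startswith pos t
      · simp only [hs, if_true]
        rw [← ih ts (k + 1) hrest]
        cases greedyIdx rest ts (k + 1) with
        | none => rfl
        | some r => simp [htok]
      · simp only [hs, Bool.false_eq_true, if_false]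
        exact ih (t :: ts) (k + 1) hrest

-- ===== VERDICT (by name: the statement is the Claim_ definition above) =====
theorem extract_simple_sequences_spec : Claim_equal_extract_simple_sequences := by
  intro s ts _
  show _ = _
  simp only [extract_simple_sequences]
  rw [alt_eq_greedy]
  have h0 : (0 : Int) - 1 = -1 := by norm_num
  have := aLoop_eq s ts 0 [] (Nat.zero_le _)
  simp only [Nat.cast_zero, h0, List.drop_zero] at this
  rw [this]
  have htok := greedyIdx_tokens s s ts 0 (by simp)
  cases hg : greedyIdx s ts 0 with
  | none => simp [hg] at htok ⊢; rw [← htok]; rfl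
  | some r =>
    simp only [Option.map_some]
    rw [hg] at htok
    simp only [Option.map_some] at htok
    rw [← htok]
    simp
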